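-- pv_equiv track=rewrite | github.com/lucasdino/ai-battlemaps | engine/layoutgen/agent/agent_functions.py | _map_assets
-- ===== SOURCE A (Python) =====
-- def _map_assets(asset_list):
--     """
--     Helper function that returns a string (formatted asset list in prompt) and dict that maps from abbreviated name to the underlying asset.
--     """
--     asset_list_dict = dict()
--     used_keys = set()
--     asset_list_prompt_lines = []
--
--     for name, desc, asset_id in sorted(asset_list, key=lambda x: x[0].lower()):
--         base_char = name[0].lower()
--         key = base_char
--         i = 1
--         while key in used_keys:
--             key = f"{base_char}{i}"
--             i += 1
--         used_keys.add(key)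
--         asset_list_dict[key] = asset_id
--         asset_list_prompt_lines.append(f"- {key}: {desc}")
--
--     asset_list_prompt = "\n".join(asset_list_prompt_lines)
--
--     # Ensure doors can get mapped -- hack; TODO: Make more robust to ensure agent provides door asset
--     asset_list_dict['D'] = 'door_wood_arched_1'
--
--     return asset_list_prompt, asset_list_dict
-- ===== SOURCE B (Python) =====
-- def _key(b, i):
--     return b if i == 0 else f"{b}{i}"
--
--
-- def _map_assets(asset_list):
--     """
--     Helper function that returns a string (formatted asset list in prompt) and dict that maps from abbreviated name to the underlying asset.
--     """
--     ordered = sorted(asset_list, key=lambda x: x[0].lower())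
--     bases = [name[0].lower() for name, _, _ in ordered]
--     keys = [_key(b, bases[:j].count(b)) for j, b in enumerate(bases)]
--     prompt = "\n".join(f"- {k}: {d}" for k, (_, d, _) in zip(keys, ordered))
--     mapping = {k: a for k, (_, _, a) in zip(keys, ordered)}
--     mapping['D'] = 'door_wood_arched_1'
--     return prompt, mapping
-- ===== Notes on version B (the rewrite author's own statement) =====
-- stated objective: alternative
-- what changed: Replaces A's stateful single pass (used_keys set plus a while-loop probing candidate suffixes and an accumulator dict) by staged passes: compute the list of lowered first characters, derive each key positionally as base plus the count of that base in the sorted prefix, then build the prompt and the dict by zipping keys with the sorted assets.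
import Mathlib
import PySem

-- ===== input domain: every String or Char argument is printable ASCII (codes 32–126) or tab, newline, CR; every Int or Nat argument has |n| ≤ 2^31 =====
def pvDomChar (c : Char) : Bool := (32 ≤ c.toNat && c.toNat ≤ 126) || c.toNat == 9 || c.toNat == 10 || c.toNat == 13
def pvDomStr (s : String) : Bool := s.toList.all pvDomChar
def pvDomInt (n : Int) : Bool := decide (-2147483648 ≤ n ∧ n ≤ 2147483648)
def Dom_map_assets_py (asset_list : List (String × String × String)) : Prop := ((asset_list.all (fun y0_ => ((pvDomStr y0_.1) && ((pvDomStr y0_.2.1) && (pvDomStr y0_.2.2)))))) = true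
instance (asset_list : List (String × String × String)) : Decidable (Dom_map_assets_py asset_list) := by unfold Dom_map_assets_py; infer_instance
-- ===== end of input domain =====

-- B replaces A's stateful pass (used-keys set + while-loop suffix probing + accumulator dict)
-- by staged passes: a bases list, positional keys from prefix counts, then zip-built prompt and dict.

-- ===== PORT A =====
-- the 'while key in used_keys' loop; fuel used.length + 1 always suffices (the candidate keys are
-- pairwise distinct, so at most used.length of them can be members)
def pvAwhile (used : PySem.Set String) (base : String) : String → Int → Nat → String
  | key, _, 0 => key
  | key, i, fuel + 1 =>
    if PySem.Set.contains used key then pvAwhile used base (base ++ PySem.Int.toStr i) (i + 1) fuel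
    else key

def pvStepA (st : PySem.Dict String String × PySem.Set String × List String)
    (item : String × String × String) : PySem.Dict String String × PySem.Set String × List String :=
  match item.1.toList with
  | [] => st   -- Python raises IndexError (name[0] on an empty name); excluded by Pre_
  | ch :: _ =>
    let base := PySem.Str.lower (String.ofList [ch])
    let key := pvAwhile st.2.1 base base 1 (st.2.1.length + 1)
    (st.1.insert key item.2.2, PySem.Set.add st.2.1 key,
     st.2.2 ++ ["- " ++ key ++ ": " ++ item.2.1])

def map_assets_py (asset_list : List (String × String × String)) : String × (List (String × String)) :=
  let st := (PySem.List.sorted asset_list (fun x => PySem.Str.lower x.1) false).foldl pvStepA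
    (PySem.Dict.empty, PySem.Set.empty, [])
  (PySem.Str.join "\n" st.2.2, (st.1.insert "D" "door_wood_arched_1").items)

-- ===== PORT B =====
def pvKeyB (b : String) (i : Nat) : String :=
  if i == 0 then b else b ++ PySem.Int.toStr (i : Int)

def pvBaseOf (name : String) : String :=
  match name.toList with
  | [] => ""   -- Python raises IndexError (name[0] on an empty name); excluded by Pre_
  | c :: _ => PySem.Str.lower (String.ofList [c])

def map_assets_py_alt (asset_list : List (String × String × String)) : String × (List (String × String)) :=
  let ordered := PySem.List.sorted asset_list (fun x => PySem.Str.lower x.1) false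
  let bases := ordered.map (fun p => pvBaseOf p.1)
  let keys := (PySem.List.enumerate bases).map
      (fun jb => pvKeyB jb.2 ((PySem.List.slice bases none (some jb.1)).count jb.2))
  let prompt := PySem.Str.join "\n"
      ((keys.zip ordered).map (fun kp => "- " ++ kp.1 ++ ": " ++ kp.2.2.1))
  let mapping := (keys.zip ordered).foldl (fun d kp => d.insert kp.1 kp.2.2.2) PySem.Dict.empty
  (prompt, (mapping.insert "D" "door_wood_arched_1").items)

-- ===== PRECONDITION & SPEC =====
-- A raises IndexError on name[0] when some asset name is the empty string; exactly those inputs are excluded.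
def Pre_map_assets_py (asset_list : List (String × String × String)) : Prop :=
  ∀ p ∈ asset_list, p.1 ≠ ""
instance (asset_list : List (String × String × String)) : Decidable (Pre_map_assets_py asset_list) := by unfold Pre_map_assets_py; infer_instance

def pvWitness_map_assets_py : (List (String × String × String)) :=
  [("Chair", "a small chair", "chair_1"), ("crate", "a wooden crate", "crate_2"), ("Torch", "a wall torch", "torch_1")]

def Spec_map_assets_py (asset_list : List (String × String × String)) (out : String × (List (String × String))) : Prop := out = map_assets_py_alt asset_list
instance (asset_list : List (String × String × String)) (out : String × (List (String × String))) : Decidable (Spec_map_assets_py asset_list out) := by unfold Spec_map_assets_py; infer_instance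

-- ===== CLAIM (what is proved, stated in full; the proofs are below) =====
def Claim_equal_map_assets_py : Prop := ∀ (asset_list : List (String × String × String)), Dom_map_assets_py asset_list → Pre_map_assets_py asset_list → Spec_map_assets_py asset_list (map_assets_py asset_list)

-- ===== LEMMAS AND PROOFS =====

-- ---- decimal representation: Nat.toDigits 10 is injective ----
theorem pvTdcPrepend (f : Nat) : ∀ (n : Nat) (l : List Char),
    Nat.toDigitsCore 10 f n l = Nat.toDigitsCore 10 f n [] ++ l := by
  induction f with
  | zero => intro n l; simp [Nat.toDigitsCore]
  | succ f ih =>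
    intro n l
    simp only [Nat.toDigitsCore]
    by_cases h : n / 10 = 0
    · simp [h]
    · simp only [h, if_false]
      rw [ih (n / 10) (Nat.digitChar (n % 10) :: l), ih (n / 10) [Nat.digitChar (n % 10)]]
      simp

theorem pvTdcFuel (n : Nat) : ∀ (f g : Nat), n < f → n < g →
    Nat.toDigitsCore 10 f n [] = Nat.toDigitsCore 10 g n [] := by
  induction n using Nat.strong_induction_on with
  | _ n ih =>
    intro f g hf hg
    match f, g with
    | f + 1, g + 1 =>
      simp only [Nat.toDigitsCore]
      by_cases h : n / 10 = 0
      · simp [h]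
      · simp only [h, if_false]
        rw [pvTdcPrepend f, pvTdcPrepend g]
        have h10 : 10 ≤ n := by
          by_contra hlt
          exact h (Nat.div_eq_of_lt (by omega))
        have hlt : n / 10 < n := Nat.div_lt_self (by omega) (by omega)
        rw [ih (n / 10) hlt f g (by omega) (by omega)]

def pvDval (cs : List Char) : Nat := cs.foldl (fun a c => 10 * a + (c.toNat - 48)) 0

theorem pvDval_append (cs : List Char) (c : Char) :
    pvDval (cs ++ [c]) = 10 * pvDval cs + (c.toNat - 48) := by
  simp [pvDval, List.foldl_append]

theorem pvDval_toDigits (n : Nat) : pvDval (Nat.toDigits 10 n) = n := by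
  induction n using Nat.strong_induction_on with
  | _ n ih =>
    unfold Nat.toDigits
    simp only [Nat.toDigitsCore]
    by_cases h : n / 10 = 0
    · have hn : n < 10 := by
        by_contra hge
        have := Nat.div_le_div_right (c := 10) (Nat.le_of_not_lt hge)
        omega
      simp only [h, if_true]
      interval_cases n <;> decide
    · simp only [h, if_false]
      rw [pvTdcPrepend]
      have h10 : 10 ≤ n := by
        by_contra hlt
        exact h (Nat.div_eq_of_lt (by omega))
      have hlt : n / 10 < n := Nat.div_lt_self (by omega) (by omega)
      rw [pvTdcFuel (n / 10) n (n / 10 + 1) (by omega) (by omega)]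
      rw [pvDval_append]
      have := ih (n / 10) hlt
      unfold Nat.toDigits at this
      rw [this]
      have hmod : n % 10 < 10 := Nat.mod_lt _ (by omega)
      have hd : (Nat.digitChar (n % 10)).toNat - 48 = n % 10 := by
        interval_cases h : (n % 10) <;> decide
      rw [hd]
      omega

theorem pvToDigits_inj (m n : Nat) (h : Nat.toDigits 10 m = Nat.toDigits 10 n) : m = n := by
  have := congrArg pvDval h
  rwa [pvDval_toDigits, pvDval_toDigits] at this

theorem pvToDigits_ne_nil (n : Nat) : Nat.toDigits 10 n ≠ [] := by
  unfold Nat.toDigits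
  simp only [Nat.toDigitsCore]
  by_cases h : n / 10 = 0
  · simp [h]
  · simp only [h, if_false]
    rw [pvTdcPrepend]
    simp

-- ---- keys ----
def pvKeyOf (c : Char) (j : Nat) : String := pvKeyB (String.ofList [c]) j

theorem pvToList_keyOf (c : Char) (j : Nat) :
    (pvKeyOf c j).toList = c :: (if j = 0 then [] else Nat.toDigits 10 j) := by
  unfold pvKeyOf pvKeyB
  by_cases h : j = 0
  · simp [h]
  · simp only [h, if_false, beq_iff_eq, String.toList_append, String.toList_ofList,
      PySem.Int.toList_toStr]
    simp [PySem.Int.toChars]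

theorem pvKeyOf_inj {c c' : Char} {j j' : Nat} (h : pvKeyOf c j = pvKeyOf c' j') :
    c = c' ∧ j = j' := by
  have hl := congrArg String.toList h
  rw [pvToList_keyOf, pvToList_keyOf] at hl
  have hc : c = c' := by simpa using congrArg (List.headD · ' ') hl
  refine ⟨hc, ?_⟩
  have ht : (if j = 0 then ([] : List Char) else Nat.toDigits 10 j)
      = (if j' = 0 then [] else Nat.toDigits 10 j') := by
    simpa using congrArg List.tail hl
  by_cases h0 : j = 0 <;> by_cases h0' : j' = 0
  · omega
  · simp [h0, h0'] at ht; exact absurd ht (pvToDigits_ne_nil j')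
  · simp [h0, h0'] at ht; exact absurd ht (pvToDigits_ne_nil j)
  · simp [h0, h0'] at ht; exact pvToDigits_inj _ _ ht

theorem pvBase_eq (ch : Char) :
    PySem.Str.lower (String.ofList [ch]) = String.ofList [PySem.Chars.lowerChar ch] := by
  apply String.toList_inj.mp
  simp [PySem.Str.toList_lower, PySem.Chars.lower]

-- ---- invariant relating A's used-keys set to the multiset of bases already processed ----
def pvInvP (pre : List Char) (used : PySem.Set String) : Prop :=
  ∀ s : String, s ∈ used ↔ ∃ c j, s = pvKeyOf c j ∧ j < pre.count c

theorem pvMemKeyP {pre : List Char} {used : PySem.Set String}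
    (hInv : pvInvP pre used) (c : Char) (m : Nat) :
    pvKeyOf c m ∈ used ↔ m < pre.count c := by
  rw [hInv]
  constructor
  · rintro ⟨c', j', hk, hj⟩
    obtain ⟨rfl, rfl⟩ := pvKeyOf_inj hk
    exact hj
  · intro hm; exact ⟨c, m, rfl, hm⟩

theorem pvK_le {used : PySem.Set String} {c : Char} {K : Nat}
    (hmem : ∀ m < K, pvKeyOf c m ∈ used) : K ≤ used.length := by
  have hsub : (List.range K).map (pvKeyOf c) ⊆ used := by
    intro s hs
    simp only [List.mem_map, List.mem_range] at hs
    obtain ⟨m, hm, rfl⟩ := hs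
    exact hmem m hm
  have hnd : ((List.range K).map (pvKeyOf c)).Nodup := by
    refine List.Nodup.map_on ?_ (List.nodup_range)
    intro a _ b _ hab
    exact (pvKeyOf_inj hab).2
  have := (hnd.subperm hsub).length_le
  simpa using this

theorem pvContains_true {used : PySem.Set String} {s : String} (h : s ∈ used) :
    PySem.Set.contains used s = true := by
  simp [PySem.Set.contains]
  exact h

theorem pvContains_false {used : PySem.Set String} {s : String} (h : s ∉ used) :
    PySem.Set.contains used s = false := by
  simp [PySem.Set.contains]
  exact h

theorem pvAwhile_spec (used : PySem.Set String) (c : Char) (K : Nat)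
    (hmem : ∀ m < K, pvKeyOf c m ∈ used) (hnot : pvKeyOf c K ∉ used) :
    ∀ (fuel j : Nat), j ≤ K → K - j < fuel →
      pvAwhile used (String.ofList [c]) (pvKeyOf c j) ((j : Int) + 1) fuel = pvKeyOf c K := by
  intro fuel
  induction fuel with
  | zero => intro j _ h; omega
  | succ fuel ih =>
    intro j hj hfuel
    by_cases hjK : j = K
    · subst hjK
      simp only [pvAwhile, pvContains_false hnot, Bool.false_eq_true, if_false]
    · have hjlt : j < K := by omega
      simp only [pvAwhile, pvContains_true (hmem j hjlt), if_true]
      have hkey : String.ofList [c] ++ PySem.Int.toStr ((j : Int) + 1) = pvKeyOf c (j + 1) := by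
        unfold pvKeyOf pvKeyB
        simp only [beq_iff_eq, Nat.succ_ne_zero, if_false]
        norm_num
      rw [hkey]
      have := ih (j + 1) (by omega) (by omega)
      simpa using this

theorem pvStep_keyP {pre : List Char} {used : PySem.Set String}
    (hInv : pvInvP pre used) (c : Char) :
    pvAwhile used (String.ofList [c]) (String.ofList [c]) 1 (used.length + 1)
      = pvKeyOf c (pre.count c) := by
  set K := pre.count c with hK
  have hmem : ∀ m < K, pvKeyOf c m ∈ used := by
    intro m hm
    rw [pvMemKeyP hInv]
    omega
  have hnot : pvKeyOf c K ∉ used := by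
    rw [pvMemKeyP hInv]
    omega
  have h0 : pvKeyOf c 0 = String.ofList [c] := by simp [pvKeyOf, pvKeyB]
  have h1 : ((0 : Nat) : Int) + 1 = 1 := by norm_num
  rw [← h0, ← h1]
  exact pvAwhile_spec used c K hmem hnot (used.length + 1) 0 (Nat.zero_le _)
    (by have := pvK_le hmem; omega)

theorem pvInvP_step {pre : List Char} {used : PySem.Set String}
    (hInv : pvInvP pre used) (c : Char) :
    pvInvP (pre ++ [c]) (PySem.Set.add used (pvKeyOf c (pre.count c))) := by
  intro s
  rw [PySem.Set.mem_add, hInv]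
  constructor
  · rintro (⟨c', j', rfl, hj⟩ | rfl)
    · refine ⟨c', j', rfl, ?_⟩
      simp only [List.count_append, List.count_singleton]
      omega
    · refine ⟨c, _, rfl, ?_⟩
      simp only [List.count_append, List.count_singleton]
      simp
  · rintro ⟨c', j', rfl, hj⟩
    simp only [List.count_append, List.count_singleton] at hj
    by_cases hcc : c' = c
    · subst hcc
      simp only [beq_self_eq_true, if_pos] at hj
      by_cases hje : j' < pre.count c'
      · exact Or.inl ⟨c', j', rfl, hje⟩
      · right
        have : j' = pre.count c' := by simp at hj; omega
        rw [this]
    · left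
      refine ⟨c', j', rfl, ?_⟩
      have hcf : (c == c') = false := by simp [Ne.symm hcc]
      rw [hcf] at hj
      simpa using hj

-- ---- the sequence of keys, indexed by the bases already processed ----
def keySeqC : List Char → List Char → List String
  | _, [] => []
  | pre, c :: cs => pvKeyOf c (pre.count c) :: keySeqC (pre ++ [c]) cs

theorem length_keySeqC (cs : List Char) : ∀ pre, (keySeqC pre cs).length = cs.length := by
  induction cs with
  | nil => intro pre; rfl
  | cons c cs ih => intro pre; simp [keySeqC, ih]

theorem getElem_keySeqC (cs : List Char) : ∀ (pre : List Char) (k : Nat) (hk : k < cs.length),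
    (keySeqC pre cs)[k]'(by rw [length_keySeqC]; exact hk)
      = pvKeyOf cs[k] (pre.count cs[k] + (cs.take k).count cs[k]) := by
  induction cs with
  | nil => intro pre k hk; simp at hk
  | cons c cs ih =>
    intro pre k hk
    match k with
    | 0 => simp [keySeqC]
    | k + 1 =>
      have hk' : k < cs.length := by simpa using hk
      simp only [keySeqC, List.getElem_cons_succ, List.take_succ_cons]
      rw [ih (pre ++ [c]) k hk']
      congr 1
      simp only [List.count_append, List.count_cons, List.count_nil]
      split_ifs <;> omega

def pvBaseChar (p : String × String × String) : Char :=
  match p.1.toList with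
  | [] => ' '
  | c :: _ => PySem.Chars.lowerChar c

-- ---- A's fold computes exactly the zip of keySeqC with the items ----
theorem pvFoldA (l : List (String × String × String)) :
    ∀ (pre : List Char) (used : PySem.Set String) (d : PySem.Dict String String)
      (lines : List String),
      (∀ p ∈ l, p.1.toList ≠ []) → pvInvP pre used →
      (l.foldl pvStepA (d, used, lines)).1
        = ((keySeqC pre (l.map pvBaseChar)).zip l).foldl
            (fun d kp => d.insert kp.1 kp.2.2.2) d ∧
      (l.foldl pvStepA (d, used, lines)).2.2
        = lines ++ ((keySeqC pre (l.map pvBaseChar)).zip l).map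
            (fun kp => "- " ++ kp.1 ++ ": " ++ kp.2.2.1) := by
  induction l with
  | nil => intro pre used d lines _ _; exact ⟨rfl, by simp [keySeqC]⟩
  | cons p l ih =>
    intro pre used d lines hne hInv
    obtain ⟨ch, rest, hp⟩ : ∃ ch rest, p.1.toList = ch :: rest := by
      cases h : p.1.toList with
      | nil => exact absurd h (hne p List.mem_cons_self)
      | cons a b => exact ⟨a, b, rfl⟩
    have hbc : pvBaseChar p = PySem.Chars.lowerChar ch := by
      simp [pvBaseChar, hp]
    have hstep : pvStepA (d, used, lines) p =
        (d.insert (pvKeyOf (PySem.Chars.lowerChar ch) (pre.count (PySem.Chars.lowerChar ch))) p.2.2,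
         PySem.Set.add used (pvKeyOf (PySem.Chars.lowerChar ch) (pre.count (PySem.Chars.lowerChar ch))),
         lines ++ ["- " ++ pvKeyOf (PySem.Chars.lowerChar ch) (pre.count (PySem.Chars.lowerChar ch))
           ++ ": " ++ p.2.1]) := by
      simp only [pvStepA, hp, pvBase_eq, pvStep_keyP hInv]
    simp only [List.foldl_cons, hstep, List.map_cons, hbc, keySeqC, List.zip_cons_cons,
      List.foldl_cons, List.map_cons]
    have := ih (pre ++ [PySem.Chars.lowerChar ch])
      (PySem.Set.add used (pvKeyOf (PySem.Chars.lowerChar ch) (pre.count (PySem.Chars.lowerChar ch))))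
      (d.insert (pvKeyOf (PySem.Chars.lowerChar ch) (pre.count (PySem.Chars.lowerChar ch))) p.2.2)
      (lines ++ ["- " ++ pvKeyOf (PySem.Chars.lowerChar ch) (pre.count (PySem.Chars.lowerChar ch))
        ++ ": " ++ p.2.1])
      (fun q hq => hne q (List.mem_cons_of_mem _ hq)) (pvInvP_step hInv _)
    refine ⟨this.1, ?_⟩
    rw [this.2]
    simp

theorem pvOfList_single_inj : Function.Injective (fun c : Char => String.ofList [c]) := by
  intro a b hab
  simpa using congrArg String.toList hab

-- ===== VERDICT (by name: the statement is the Claim_ definition above) =====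
theorem map_assets_py_spec : Claim_equal_map_assets_py := by
  intro al _ hPre
  unfold Spec_map_assets_py map_assets_py map_assets_py_alt
  set L := PySem.List.sorted al (fun x => PySem.Str.lower x.1) false with hL
  have hne : ∀ p ∈ L, p.1.toList ≠ [] := by
    intro p hp hnil
    apply hPre p ((PySem.List.mem_sorted al _ false p).mp hp)
    apply String.toList_inj.mp
    rw [hnil]
    rfl
  have hbases : L.map (fun p => pvBaseOf p.1)
      = (L.map pvBaseChar).map (fun c => String.ofList [c]) := by
    rw [List.map_map]
    apply List.map_congr_left
    intro p hp
    cases h : p.1.toList with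
    | nil => exact absurd h (hne p hp)
    | cons c cs => simp [pvBaseOf, pvBaseChar, h, pvBase_eq]
  set bs := L.map pvBaseChar with hbs
  have hkeys : (PySem.List.enumerate (L.map fun p => pvBaseOf p.1)).map
      (fun jb => pvKeyB jb.2
        ((PySem.List.slice (L.map fun p => pvBaseOf p.1) none (some jb.1)).count jb.2))
      = keySeqC [] bs := by
    rw [hbases]
    apply List.ext_getElem
    · simp [PySem.List.length_enumerate, length_keySeqC]
    · intro k h1 h2
      have hk : k < bs.length := by simpa [PySem.List.length_enumerate] using h1
      rw [List.getElem_map]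
      rw [PySem.List.getElem_enumerate]
      have hslice : PySem.List.slice (bs.map fun c => String.ofList [c]) none (some ((0 : Int) + k))
          = (bs.map fun c => String.ofList [c]).take k := by
        have : (0 : Int) + (k : Int) = ((k : Nat) : Int) := by ring
        rw [this, PySem.List.slice_to_natCast]
      rw [hslice]
      have hget : (bs.map fun c => String.ofList [c])[k]'(by simpa using hk)
          = String.ofList [bs[k]] := by simp
      rw [getElem_keySeqC bs [] k hk]
      simp only [hget, ← List.map_take]
      rw [List.count_map_of_injective _ _ pvOfList_single_inj]
      simp [pvKeyOf]
  have hInv0 : pvInvP [] PySem.Set.empty := by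
    intro s
    constructor
    · intro h; simp [PySem.Set.empty] at h
    · rintro ⟨c, j, _, hj⟩
      simp at hj
  obtain ⟨h1, h2⟩ := pvFoldA L [] PySem.Set.empty PySem.Dict.empty [] hne hInv0
  simp only [h1, h2, hkeys, List.nil_append]
  rfl
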